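-- pv_equiv track=rewrite | github.com/thomascassidyzm/ssi-dashboard-v7 | phase5_generator_s0441_s0450.py | calculate_phrase_distribution
-- ===== SOURCE A (Python) =====
-- from typing import Dict, List, Tuple
--
-- def calculate_phrase_distribution(phrases: List[List]) -> Dict:
--     """Calculate the distribution of phrase lengths"""
--     dist = {
--         'short_1_to_2_legos': 0,
--         'medium_3_legos': 0,
--         'longer_4_legos': 0,
--         'longest_5_legos': 0
--     }
--
--     for phrase in phrases:
--         wc = phrase[3] if len(phrase) > 3 else 1
--         if wc <= 2:
--             dist['short_1_to_2_legos'] += 1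
--         elif wc == 3:
--             dist['medium_3_legos'] += 1
--         elif wc <= 5:
--             dist['longer_4_legos'] += 1
--         else:
--             dist['longest_5_legos'] += 1
--
--     return dist
-- ===== SOURCE B (Python) =====
-- def calculate_phrase_distribution(phrases):
--     """Calculate the distribution of phrase lengths"""
--     wcs = [p[3] if len(p) > 3 else 1 for p in phrases]
--     return {
--         'short_1_to_2_legos': sum(1 for wc in wcs if wc <= 2),
--         'medium_3_legos': sum(1 for wc in wcs if wc == 3),
--         'longer_4_legos': sum(1 for wc in wcs if 3 < wc <= 5),
--         'longest_5_legos': sum(1 for wc in wcs if wc > 5),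
--     }
-- ===== Notes on version B (the rewrite author's own statement) =====
-- stated objective: simpler
-- what changed: Replaced the single accumulating dict pass with an elif chain by a word-count map followed by four independent filter-count passes, one per bucket, returned as a dict literal.
import Mathlib
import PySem

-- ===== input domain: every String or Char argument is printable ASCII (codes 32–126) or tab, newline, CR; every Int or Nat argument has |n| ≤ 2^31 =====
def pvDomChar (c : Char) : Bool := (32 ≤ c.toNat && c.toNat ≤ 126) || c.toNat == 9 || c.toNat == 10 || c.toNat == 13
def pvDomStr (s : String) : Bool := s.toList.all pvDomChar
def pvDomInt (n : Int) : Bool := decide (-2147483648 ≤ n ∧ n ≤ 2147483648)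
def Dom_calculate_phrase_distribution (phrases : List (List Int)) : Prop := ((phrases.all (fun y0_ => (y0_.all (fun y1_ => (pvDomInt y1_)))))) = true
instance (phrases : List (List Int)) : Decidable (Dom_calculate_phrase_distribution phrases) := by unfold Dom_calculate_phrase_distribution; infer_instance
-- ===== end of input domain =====

-- B replaces A's single accumulating dict pass (elif chain) by four independent
-- filter-count passes over the word counts; same cost, simpler decomposition.

-- ===== PORT A =====
-- wc = phrase[3] if len(phrase) > 3 else 1
def pvWcA (phrase : List Int) : Int :=
  if (phrase.length : Int) > 3 then (PySem.List.pyGet? phrase 3).getD 1 else 1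

def calculate_phrase_distribution (phrases : List (List Int)) : List (String × Int) :=
  let dist : PySem.Dict String Int := PySem.Dict.ofList
    [("short_1_to_2_legos", 0), ("medium_3_legos", 0),
     ("longer_4_legos", 0), ("longest_5_legos", 0)]
  let dist := phrases.foldl (fun d phrase =>
    let wc := pvWcA phrase
    if wc ≤ 2 then d.modify "short_1_to_2_legos" 0 (· + 1)
    else if wc = 3 then d.modify "medium_3_legos" 0 (· + 1)
    else if wc ≤ 5 then d.modify "longer_4_legos" 0 (· + 1)
    else d.modify "longest_5_legos" 0 (· + 1)) dist
  dist.items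

-- ===== PORT B =====
def pvWcB (p : List Int) : Int :=
  if (p.length : Int) > 3 then (PySem.List.pyGet? p 3).getD 1 else 1

def calculate_phrase_distribution_alt (phrases : List (List Int)) : List (String × Int) :=
  let wcs := phrases.map pvWcB
  [("short_1_to_2_legos", ((wcs.countP (fun wc => wc ≤ 2)) : Int)),
   ("medium_3_legos", ((wcs.countP (fun wc => wc == 3)) : Int)),
   ("longer_4_legos", ((wcs.countP (fun wc => 3 < wc && wc ≤ 5)) : Int)),
   ("longest_5_legos", ((wcs.countP (fun wc => wc > 5)) : Int))]

-- ===== PRECONDITION & SPEC =====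
def Spec_calculate_phrase_distribution (phrases : List (List Int)) (out : List (String × Int)) : Prop := out = calculate_phrase_distribution_alt phrases
instance (phrases : List (List Int)) (out : List (String × Int)) : Decidable (Spec_calculate_phrase_distribution phrases out) := by unfold Spec_calculate_phrase_distribution; infer_instance

-- ===== CLAIM (what is proved, stated in full; the proofs are below) =====
def Claim_equal_calculate_phrase_distribution : Prop := ∀ (phrases : List (List Int)), Dom_calculate_phrase_distribution phrases → Spec_calculate_phrase_distribution phrases (calculate_phrase_distribution phrases)

-- ===== LEMMAS AND PROOFS =====

-- invariant of A's loop: starting from the four-key literal dict, the loop adds the bucket counts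
theorem pv_loop_inv (l : List (List Int)) (a b c d : Int) :
    (l.foldl (fun d phrase =>
      let wc := pvWcA phrase
      if wc ≤ 2 then d.modify "short_1_to_2_legos" 0 (· + 1)
      else if wc = 3 then d.modify "medium_3_legos" 0 (· + 1)
      else if wc ≤ 5 then d.modify "longer_4_legos" 0 (· + 1)
      else d.modify "longest_5_legos" 0 (· + 1))
      (PySem.Dict.mk [("short_1_to_2_legos", a), ("medium_3_legos", b),
                      ("longer_4_legos", c), ("longest_5_legos", d)])).items =
    [("short_1_to_2_legos", a + ((l.map pvWcA).countP (fun wc => wc ≤ 2) : Int)),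
     ("medium_3_legos", b + ((l.map pvWcA).countP (fun wc => wc == 3) : Int)),
     ("longer_4_legos", c + ((l.map pvWcA).countP (fun wc => 3 < wc && wc ≤ 5) : Int)),
     ("longest_5_legos", d + ((l.map pvWcA).countP (fun wc => wc > 5) : Int))] := by
  induction l generalizing a b c d with
  | nil => simp
  | cons p t ih =>
    simp only [List.foldl_cons, List.map_cons, List.countP_cons]
    by_cases h1 : pvWcA p ≤ 2
    · rw [if_pos h1]
      rw [show (PySem.Dict.mk [("short_1_to_2_legos", a), ("medium_3_legos", b),
            ("longer_4_legos", c), ("longest_5_legos", d)]).modify "short_1_to_2_legos" 0 (· + 1)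
          = PySem.Dict.mk [("short_1_to_2_legos", a + 1), ("medium_3_legos", b),
            ("longer_4_legos", c), ("longest_5_legos", d)] from by
        simp [PySem.Dict.modify, PySem.Dict.getD, PySem.Dict.get?, PySem.Dict.insert,
              PySem.Dict.contains]]
      rw [ih]
      have e1 : decide (pvWcA p ≤ 2) = true := by simpa using h1
      have e2 : ((pvWcA p == 3) : Bool) = false := by simp; omega
      have e3 : (decide (3 < pvWcA p) && decide (pvWcA p ≤ 5)) = false := by simp; omega
      have e4 : decide (pvWcA p > 5) = false := by simp; omega
      simp only [e1, e2, e3, e4, if_true, if_false, Bool.false_eq_true]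
      simp; omega
    · by_cases h2 : pvWcA p = 3
      · rw [if_neg h1, if_pos h2]
        rw [show (PySem.Dict.mk [("short_1_to_2_legos", a), ("medium_3_legos", b),
              ("longer_4_legos", c), ("longest_5_legos", d)]).modify "medium_3_legos" 0 (· + 1)
            = PySem.Dict.mk [("short_1_to_2_legos", a), ("medium_3_legos", b + 1),
              ("longer_4_legos", c), ("longest_5_legos", d)] from by
          simp [PySem.Dict.modify, PySem.Dict.getD, PySem.Dict.get?, PySem.Dict.insert,
                PySem.Dict.contains]]
        rw [ih]
        have e1 : decide (pvWcA p ≤ 2) = false := by simp; omega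
        have e2 : ((pvWcA p == 3) : Bool) = true := by simp [h2]
        have e3 : (decide (3 < pvWcA p) && decide (pvWcA p ≤ 5)) = false := by simp; omega
        have e4 : decide (pvWcA p > 5) = false := by simp; omega
        simp only [e1, e2, e3, e4, if_true, if_false, Bool.false_eq_true]
        simp; omega
      · by_cases h3 : pvWcA p ≤ 5
        · rw [if_neg h1, if_neg h2, if_pos h3]
          rw [show (PySem.Dict.mk [("short_1_to_2_legos", a), ("medium_3_legos", b),
                ("longer_4_legos", c), ("longest_5_legos", d)]).modify "longer_4_legos" 0 (· + 1)
              = PySem.Dict.mk [("short_1_to_2_legos", a), ("medium_3_legos", b),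
                ("longer_4_legos", c + 1), ("longest_5_legos", d)] from by
            simp [PySem.Dict.modify, PySem.Dict.getD, PySem.Dict.get?, PySem.Dict.insert,
                  PySem.Dict.contains]]
          rw [ih]
          have e1 : decide (pvWcA p ≤ 2) = false := by simp; omega
          have e2 : ((pvWcA p == 3) : Bool) = false := by simp; omega
          have e3 : (decide (3 < pvWcA p) && decide (pvWcA p ≤ 5)) = true := by simp; omega
          have e4 : decide (pvWcA p > 5) = false := by simp; omega
          simp only [e1, e2, e3, e4, if_true, if_false, Bool.false_eq_true]
          simp; omega
        · rw [if_neg h1, if_neg h2, if_neg h3]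
          rw [show (PySem.Dict.mk [("short_1_to_2_legos", a), ("medium_3_legos", b),
                ("longer_4_legos", c), ("longest_5_legos", d)]).modify "longest_5_legos" 0 (· + 1)
              = PySem.Dict.mk [("short_1_to_2_legos", a), ("medium_3_legos", b),
                ("longer_4_legos", c), ("longest_5_legos", d + 1)] from by
            simp [PySem.Dict.modify, PySem.Dict.getD, PySem.Dict.get?, PySem.Dict.insert,
                  PySem.Dict.contains]]
          rw [ih]
          have e1 : decide (pvWcA p ≤ 2) = false := by simp; omega
          have e2 : ((pvWcA p == 3) : Bool) = false := by simp; omega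
          have e3 : (decide (3 < pvWcA p) && decide (pvWcA p ≤ 5)) = false := by simp; omega
          have e4 : decide (pvWcA p > 5) = true := by simp; omega
          simp only [e1, e2, e3, e4, if_true, if_false, Bool.false_eq_true]
          simp; omega

-- ===== VERDICT (by name: the statement is the Claim_ definition above) =====
theorem calculate_phrase_distribution_spec : Claim_equal_calculate_phrase_distribution := by
  intro phrases _
  show calculate_phrase_distribution phrases = calculate_phrase_distribution_alt phrases
  unfold calculate_phrase_distribution calculate_phrase_distribution_alt
  rw [show PySem.Dict.ofList [("short_1_to_2_legos", (0:Int)), ("medium_3_legos", 0),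
        ("longer_4_legos", 0), ("longest_5_legos", 0)]
      = PySem.Dict.mk [("short_1_to_2_legos", 0), ("medium_3_legos", 0),
        ("longer_4_legos", 0), ("longest_5_legos", 0)] from by decide]
  rw [pv_loop_inv phrases 0 0 0 0]
  have hwc : pvWcB = pvWcA := rfl
  simp [hwc]
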